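-- pv_equiv track=rewrite | github.com/epilectrik/voynich | phases/MIDDLE_SUBCOMPONENT_GRAMMAR/scripts/test6_folio_progression.py | build_component_vocab
-- ===== SOURCE A (Python) =====
-- from collections import Counter, defaultdict
--
-- def coverage_count(middles, n):
--     """Count how many different MIDDLEs contain each n-gram."""
--     gram_to_middles = defaultdict(set)
--     for m in middles:
--         if len(m) >= n:
--             for i in range(len(m) - n + 1):
--                 ng = m[i:i+n]
--                 gram_to_middles[ng].add(m)
--     return {g: len(ms) for g, ms in gram_to_middles.items()}
--
-- def build_component_vocab(all_middles, min_coverage=20):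
--     """Build component vocabulary."""
--     all_chars = ''.join(all_middles)
--     char_freq = Counter(all_chars)
--
--     coverage_2 = coverage_count(all_middles, 2)
--     coverage_3 = coverage_count(all_middles, 3)
--
--     components_2 = {g for g, c in coverage_2.items() if c >= min_coverage}
--     components_3 = {g for g, c in coverage_3.items() if c >= min_coverage}
--     single_chars = {ch for ch, c in char_freq.items() if c >= 50}
--
--     return components_3 | components_2 | single_chars
-- ===== SOURCE B (Python) =====
-- from collections import Counter
--
-- def _ngrams(m, n):
--     return [m[i:i+n] for i in range(len(m) - n + 1)]
--
-- def _coverage(middles, n):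
--     """Gram-major two-stage coverage: for each distinct n-gram, count the
--     distinct middles whose gram set contains it."""
--     distinct = list(dict.fromkeys(middles))
--     gram_sets = [set(_ngrams(m, n)) for m in distinct]
--     universe = list(dict.fromkeys(g for m in distinct for g in _ngrams(m, n)))
--     return {g: sum(1 for gs in gram_sets if g in gs) for g in universe}
--
-- def build_component_vocab(all_middles, min_coverage=20):
--     """Build component vocabulary."""
--     all_chars = ''.join(all_middles)
--     char_freq = Counter(all_chars)
--
--     coverage_2 = _coverage(all_middles, 2)
--     coverage_3 = _coverage(all_middles, 3)
--
--     components_2 = {g for g, c in coverage_2.items() if c >= min_coverage}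
--     components_3 = {g for g, c in coverage_3.items() if c >= min_coverage}
--     single_chars = {ch for ch, c in char_freq.items() if c >= 50}
--
--     return components_3 | components_2 | single_chars
-- ===== Notes on version B (the rewrite author's own statement) =====
-- stated objective: alternative
-- what changed: coverage is computed gram-major in two stages -- first the distinct middles, their gram sets and the n-gram universe are materialized, then each n-gram's coverage is counted by scanning the per-middle gram sets -- instead of A's single middle-major pass accumulating a defaultdict from gram to the set of middles containing it.
import Mathlib
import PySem

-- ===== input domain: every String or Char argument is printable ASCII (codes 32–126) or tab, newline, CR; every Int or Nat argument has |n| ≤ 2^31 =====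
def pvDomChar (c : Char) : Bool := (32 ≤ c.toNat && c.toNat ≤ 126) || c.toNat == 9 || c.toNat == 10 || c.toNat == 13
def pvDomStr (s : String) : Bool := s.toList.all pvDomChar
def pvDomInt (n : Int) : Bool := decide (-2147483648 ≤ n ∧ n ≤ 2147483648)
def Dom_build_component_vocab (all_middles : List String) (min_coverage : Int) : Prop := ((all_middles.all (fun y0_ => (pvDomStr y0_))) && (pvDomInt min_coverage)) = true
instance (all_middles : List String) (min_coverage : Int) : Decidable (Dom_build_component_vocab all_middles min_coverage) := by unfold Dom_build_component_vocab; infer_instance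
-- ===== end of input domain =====

-- B computes coverage gram-major in two stages (distinct middles / gram sets / gram
-- gramUniverse first, then a counting scan per gram) instead of A's middle-major pass
-- over a dict from gram to the set of containing middles; same result, similar cost.
-- The function returns a Python set: the result is compared as a set.

-- ===== PORT A =====
-- helper coverage_count of A: gram -> set of middles containing it, then sizes
def coverage_count (middles : List String) (n : Int) : PySem.Dict String Int :=
  let gram_to_middles : PySem.Dict String (PySem.Set String) :=
    middles.foldl (fun d m =>
      if n ≤ PySem.Str.len m then
        (PySem.List.pyRange 0 (PySem.Str.len m - n + 1) 1).foldl
          (fun d i => d.modify (PySem.Str.slice m (some i) (some (i + n))) PySem.Set.empty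
            (fun s => PySem.Set.add s m)) d
      else d)
      PySem.Dict.empty
  gram_to_middles.items.foldl (fun acc p => acc.insert p.1 (PySem.Set.len p.2)) PySem.Dict.empty

def build_component_vocab (all_middles : List String) (min_coverage : Int) : List String :=
  let all_chars := PySem.Str.join "" all_middles
  let char_freq := PySem.Dict.counter (all_chars.toList.map (fun ch => String.ofList [ch]))
  let coverage_2 := coverage_count all_middles 2
  let coverage_3 := coverage_count all_middles 3
  let components_2 := PySem.Set.ofList ((coverage_2.items.filter (fun p => min_coverage ≤ p.2)).map (fun p => p.1))
  let components_3 := PySem.Set.ofList ((coverage_3.items.filter (fun p => min_coverage ≤ p.2)).map (fun p => p.1))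
  let single_chars := PySem.Set.ofList ((char_freq.items.filter (fun p => (50:Int) ≤ p.2)).map (fun p => p.1))
  PySem.Set.union (PySem.Set.union components_3 components_2) single_chars

-- ===== PORT B =====
-- helper _ngrams of B
def ngrams_alt (m : String) (n : Int) : List String :=
  (PySem.List.pyRange 0 (PySem.Str.len m - n + 1) 1).map
    (fun i => PySem.Str.slice m (some i) (some (i + n)))

-- helper _coverage of B: gram-major two-stage counting
def coverage_alt (middles : List String) (n : Int) : PySem.Dict String Int :=
  let distinct := PySem.List.dedup middles
  let gram_sets := distinct.map (fun m => PySem.Set.ofList (ngrams_alt m n))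
  let gramUniverse := PySem.List.dedup (distinct.flatMap (fun m => ngrams_alt m n))
  gramUniverse.foldl (fun d g =>
    d.insert g (gram_sets.foldl (fun acc gs => if g ∈ gs then acc + 1 else acc) (0 : Int)))
    PySem.Dict.empty

def build_component_vocab_alt (all_middles : List String) (min_coverage : Int) : List String :=
  let all_chars := PySem.Str.join "" all_middles
  let char_freq := PySem.Dict.counter (all_chars.toList.map (fun ch => String.ofList [ch]))
  let coverage_2 := coverage_alt all_middles 2
  let coverage_3 := coverage_alt all_middles 3
  let components_2 := PySem.Set.ofList ((coverage_2.items.filter (fun p => min_coverage ≤ p.2)).map (fun p => p.1))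
  let components_3 := PySem.Set.ofList ((coverage_3.items.filter (fun p => min_coverage ≤ p.2)).map (fun p => p.1))
  let single_chars := PySem.Set.ofList ((char_freq.items.filter (fun p => (50:Int) ≤ p.2)).map (fun p => p.1))
  PySem.Set.union (PySem.Set.union components_3 components_2) single_chars

-- ===== PRECONDITION & SPEC =====
def Spec_build_component_vocab (all_middles : List String) (min_coverage : Int) (out : List String) : Prop := out = build_component_vocab_alt all_middles min_coverage
instance (all_middles : List String) (min_coverage : Int) (out : List String) : Decidable (Spec_build_component_vocab all_middles min_coverage out) := by unfold Spec_build_component_vocab; infer_instance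

-- ===== CLAIM (what is proved, stated in full; the proofs are below) =====
def Claim_equal_build_component_vocab : Prop := ∀ (all_middles : List String) (min_coverage : Int), Dom_build_component_vocab all_middles min_coverage → Spec_build_component_vocab all_middles min_coverage (build_component_vocab all_middles min_coverage)

-- ===== LEMMAS AND PROOFS =====

-- canonical form of A's gram_to_middles accumulator
def pvD (ms : List String) (n : Int) : PySem.Dict String (PySem.Set String) :=
  ms.foldl (fun d m =>
    (ngrams_alt m n).foldl (fun d ng => d.modify ng PySem.Set.empty (fun s => PySem.Set.add s m)) d)
    PySem.Dict.empty

lemma pv_pyRange_nil {k : Int} (hk : k ≤ 0) : PySem.List.pyRange 0 k 1 = [] := by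
  simp [PySem.List.pyRange, show ¬ (0:Int) < k by omega]

lemma pvG_nil {m : String} {n : Int} (h : ¬ n ≤ PySem.Str.len m) : ngrams_alt m n = [] := by
  unfold ngrams_alt
  rw [pv_pyRange_nil (by omega)]
  rfl

lemma pvD_eq (ms : List String) (n : Int) :
    (ms.foldl (fun d m =>
      if n ≤ PySem.Str.len m then
        (PySem.List.pyRange 0 (PySem.Str.len m - n + 1) 1).foldl
          (fun d i => d.modify (PySem.Str.slice m (some i) (some (i + n))) PySem.Set.empty
            (fun s => PySem.Set.add s m)) d
      else d)
      PySem.Dict.empty) = pvD ms n := by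
  unfold pvD
  congr 1
  funext d m
  by_cases h : n ≤ PySem.Str.len m
  · rw [if_pos h]
    unfold ngrams_alt
    rw [List.foldl_map]
  · rw [if_neg h, pvG_nil h]
    rfl

lemma pv_add_append {s : PySem.Set String} {x : String} (h : ¬ x ∈ s) :
    PySem.Set.add s x = s ++ [x] := by
  simp only [PySem.Set.add, PySem.Set.contains]
  rw [if_neg (by simpa using h)]

lemma pv_update_of_subset {l : List String} {s : PySem.Set String} (h : ∀ x ∈ l, x ∈ s) :
    PySem.Set.update s l = s := by
  induction l generalizing s with
  | nil => rfl
  | cons y t ih =>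
      show PySem.Set.update (PySem.Set.add s y) t = s
      rw [PySem.Set.add_of_mem (h y (by simp))]
      exact ih (fun x hx => h x (by simp [hx]))

-- foldl over add has the seen set as prefix
lemma pv_foldl_add_prefix (l : List String) (s : PySem.Set String) :
    ∃ t, List.foldl PySem.Set.add s l = s ++ t := by
  induction l generalizing s with
  | nil => exact ⟨[], by simp⟩
  | cons x l ih =>
      simp only [List.foldl_cons]
      by_cases hx : x ∈ s
      · rw [PySem.Set.add_of_mem hx]; exact ih s
      · rw [pv_add_append hx]
        obtain ⟨t, ht⟩ := ih (s ++ [x])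
        exact ⟨[x] ++ t, by simp [ht]⟩

-- outer dedup does not change a per-middle update fold
lemma pv_fold_update_dedup (n : Int) :
    ∀ (ms : List String) (s seen : PySem.Set String),
      (∀ m ∈ seen, ∀ g ∈ ngrams_alt m n, g ∈ s) →
      ms.foldl (fun ks m => PySem.Set.update ks (ngrams_alt m n)) s
        = ((List.foldl PySem.Set.add seen ms).drop seen.length).foldl
            (fun ks m => PySem.Set.update ks (ngrams_alt m n)) s := by
  intro ms
  induction ms with
  | nil => intro s seen _; simp
  | cons m ms ih =>
      intro s seen hsub
      simp only [List.foldl_cons]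
      by_cases hm : m ∈ seen
      · rw [PySem.Set.add_of_mem hm,
          pv_update_of_subset (fun g hg => hsub m hm g hg)]
        exact ih s seen hsub
      · rw [pv_add_append hm]
        obtain ⟨t, ht⟩ := pv_foldl_add_prefix ms (seen ++ [m])
        rw [ht]
        have hd1 : ((seen ++ [m]) ++ t).drop seen.length = m :: t := by
          rw [List.append_assoc, List.drop_append_of_le_length (by simp)]
          simp
        have hd2 : ((seen ++ [m]) ++ t).drop (seen ++ [m]).length = t := by
          rw [List.drop_append_of_le_length (by simp)]
          simp
        rw [hd1]
        simp only [List.foldl_cons]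
        have := ih (PySem.Set.update s (ngrams_alt m n)) (seen ++ [m]) (by
          intro m' hm' g hg
          rw [PySem.Set.mem_update]
          rw [List.mem_append] at hm'
          rcases hm' with hm' | hm'
          · exact Or.inl (hsub m' hm' g hg)
          · simp at hm'
            subst hm'
            exact Or.inr hg)
        rw [this, ht, hd2]

-- folding update over a list of gram lists is one update over the flattening
lemma pv_fold_update_flat (n : Int) :
    ∀ (ms : List String) (s : PySem.Set String),
      ms.foldl (fun ks m => PySem.Set.update ks (ngrams_alt m n)) s
        = PySem.Set.update s (ms.flatMap (fun m => ngrams_alt m n)) := by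
  intro ms
  induction ms with
  | nil => intro s; rfl
  | cons m ms ih =>
      intro s
      simp only [List.foldl_cons, List.flatMap_cons]
      rw [ih]
      show _ = List.foldl PySem.Set.add s (ngrams_alt m n ++ ms.flatMap (fun m => ngrams_alt m n))
      rw [List.foldl_append]
      rfl

-- keys of A's accumulator
lemma pvD_keys (ms : List String) (n : Int) :
    (pvD ms n).keys = ms.foldl (fun ks m => PySem.Set.update ks (ngrams_alt m n)) [] := by
  have gen : ∀ (ms : List String) (d : PySem.Dict String (PySem.Set String)),
      (ms.foldl (fun d m =>
        (ngrams_alt m n).foldl (fun d ng => d.modify ng PySem.Set.empty (fun s => PySem.Set.add s m)) d) d).keys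
        = ms.foldl (fun ks m => PySem.Set.update ks (ngrams_alt m n)) d.keys := by
    intro ms
    induction ms with
    | nil => intro d; rfl
    | cons m ms ih =>
        intro d
        simp only [List.foldl_cons]
        rw [ih]
        congr 1
        have := PySem.Dict.keys_foldl_modify_key (ngrams_alt m n) (fun ng => ng) PySem.Set.empty
          (fun _ _ s => PySem.Set.add s m) d
        simpa using this
  unfold pvD
  rw [gen]
  rfl

lemma pvD_keys_nodup (ms : List String) (n : Int) : (pvD ms n).keys.Nodup := by
  have gen : ∀ (ms : List String) (d : PySem.Dict String (PySem.Set String)),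
      d.keys.Nodup →
      (ms.foldl (fun d m =>
        (ngrams_alt m n).foldl (fun d ng => d.modify ng PySem.Set.empty (fun s => PySem.Set.add s m)) d) d).keys.Nodup := by
    intro ms
    induction ms with
    | nil => intro d h; exact h
    | cons m ms ih =>
        intro d h
        simp only [List.foldl_cons]
        refine ih _ ?_
        have := PySem.Dict.nodup_keys_foldl_modify_key (ngrams_alt m n) (fun ng => ng) PySem.Set.empty
          (fun _ _ s => PySem.Set.add s m) d h
        simpa using this
  exact gen ms PySem.Dict.empty PySem.Dict.nodup_keys_empty

-- A's keys equal B's gram gramUniverse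
lemma pv_keys_eq_gramUniverse (ms : List String) (n : Int) :
    (pvD ms n).keys
      = PySem.List.dedup ((PySem.List.dedup ms).flatMap (fun m => ngrams_alt m n)) := by
  rw [pvD_keys]
  have h1 : ms.foldl (fun ks m => PySem.Set.update ks (ngrams_alt m n)) []
      = (PySem.List.dedup ms).foldl (fun ks m => PySem.Set.update ks (ngrams_alt m n)) [] := by
    have := pv_fold_update_dedup n ms [] [] (by simp)
    rw [this, PySem.List.dedup_eq_ofList, PySem.Set.ofList_eq_foldl]
    rfl
  rw [h1, pv_fold_update_flat]
  rw [PySem.List.dedup_eq_ofList, PySem.Set.ofList_eq_foldl]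
  rfl

-- values: A's set under a key
lemma pvD_inner_getD (m g : String) :
    ∀ (gs : List String) (d : PySem.Dict String (PySem.Set String)),
    (gs.foldl (fun d ng => d.modify ng PySem.Set.empty (fun s => PySem.Set.add s m)) d).getD g PySem.Set.empty
      = if g ∈ gs then PySem.Set.add (d.getD g PySem.Set.empty) m else d.getD g PySem.Set.empty := by
  intro gs
  induction gs with
  | nil => intro d; simp
  | cons ng gs ih =>
      intro d
      simp only [List.foldl_cons]
      rw [ih]
      by_cases hg : g ∈ gs
      · simp only [hg, if_true, List.mem_cons, or_true, if_true]
        rw [PySem.Dict.getD_modify]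
        by_cases he : g = ng
        · subst he
          rw [if_pos rfl]
          rw [PySem.Set.add_of_mem (by rw [PySem.Set.mem_add]; exact Or.inr rfl)]
        · rw [if_neg he]
      · simp only [hg, if_false]
        by_cases he : g = ng
        · subst he
          simp only [List.mem_cons, true_or, if_true]
          rw [PySem.Dict.getD_modify, if_pos rfl]
        · have : ¬ g ∈ ng :: gs := by simp [he, hg]
          simp only [this, if_false]
          rw [PySem.Dict.getD_modify, if_neg he]

lemma pv_fold_add_if (p : String → Prop) [DecidablePred p] :
    ∀ (ms : List String) (s : PySem.Set String),
    ms.foldl (fun s m => if p m then PySem.Set.add s m else s) s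
      = PySem.Set.update s (ms.filter (fun m => decide (p m))) := by
  intro ms
  induction ms with
  | nil => intro s; rfl
  | cons m ms ih =>
      intro s
      simp only [List.foldl_cons, List.filter_cons]
      by_cases hp : p m
      · simp only [hp, if_true, decide_true]
        rw [ih]
        rfl
      · simp only [hp, if_false, decide_false]
        rw [ih]
        simp

lemma pvD_getD (ms : List String) (n : Int) (g : String) :
    (pvD ms n).getD g PySem.Set.empty
      = PySem.Set.ofList (ms.filter (fun m => decide (g ∈ ngrams_alt m n))) := by
  have gen : ∀ (ms : List String) (d : PySem.Dict String (PySem.Set String)),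
      (ms.foldl (fun d m =>
        (ngrams_alt m n).foldl (fun d ng => d.modify ng PySem.Set.empty (fun s => PySem.Set.add s m)) d) d).getD g PySem.Set.empty
        = ms.foldl (fun s m => if g ∈ ngrams_alt m n then PySem.Set.add s m else s) (d.getD g PySem.Set.empty) := by
    intro ms
    induction ms with
    | nil => intro d; rfl
    | cons m ms ih =>
        intro d
        simp only [List.foldl_cons]
        rw [ih, pvD_inner_getD]
  unfold pvD
  rw [gen, PySem.Dict.getD_empty, pv_fold_add_if (fun m => g ∈ ngrams_alt m n)]
  rw [PySem.Set.ofList_eq_foldl]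
  rfl

-- dedup commutes with filter
lemma pv_dedup_filter (p : String → Bool) :
    ∀ (ms : List String) (s : PySem.Set String),
    (ms.filter p).foldl PySem.Set.add (s.filter p) = (ms.foldl PySem.Set.add s).filter p := by
  intro ms
  induction ms with
  | nil => intro s; rfl
  | cons m ms ih =>
      intro s
      by_cases hp : p m
      · simp only [List.filter_cons, hp, if_true, List.foldl_cons]
        by_cases hm : m ∈ s
        · rw [PySem.Set.add_of_mem (by rw [List.mem_filter]; exact ⟨hm, hp⟩),
            PySem.Set.add_of_mem hm]
          exact ih s
        · rw [pv_add_append (by rw [List.mem_filter]; tauto), pv_add_append hm]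
          have : (s ++ [m]).filter p = s.filter p ++ [m] := by
            simp [List.filter_append, hp]
          rw [← this]
          exact ih (s ++ [m])
      · simp only [List.foldl_cons]
        rw [List.filter_cons, if_neg (by simp [hp])]
        by_cases hm : m ∈ s
        · rw [PySem.Set.add_of_mem hm]
          exact ih s
        · rw [pv_add_append hm]
          have : (s ++ [m]).filter p = s.filter p := by
            simp [List.filter_append, hp]
          rw [← this]
          exact ih (s ++ [m])

-- a conditional counting fold is the length of the filter
lemma pv_fold_count (p : String → Prop) [DecidablePred p] :
    ∀ (ms : List String) (c : Int),
    ms.foldl (fun acc m => if p m then acc + 1 else acc) c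
      = c + ((ms.filter (fun m => decide (p m))).length : Int) := by
  intro ms
  induction ms with
  | nil => intro c; simp
  | cons m ms ih =>
      intro c
      simp only [List.foldl_cons, List.filter_cons]
      by_cases hp : p m
      · simp only [hp, if_true, decide_true, List.length_cons]
        rw [ih]
        push_cast
        ring
      · simp only [hp, if_false, decide_false]
        rw [ih]
        simp

-- B's count of a gram over the gram sets = number of distinct middles containing it
lemma pvB_count (ms : List String) (n : Int) (g : String) :
    ((PySem.List.dedup ms).map (fun m => PySem.Set.ofList (ngrams_alt m n))).foldl
        (fun acc gs => if g ∈ gs then acc + 1 else acc) (0 : Int)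
      = (((PySem.List.dedup ms).filter (fun m => decide (g ∈ ngrams_alt m n))).length : Int) := by
  rw [List.foldl_map]
  have hiff : ∀ m : String, (g ∈ PySem.Set.ofList (ngrams_alt m n)) ↔ g ∈ ngrams_alt m n := by
    intro m; simp [PySem.Set.mem_ofList]
  have : (fun (acc : Int) m => if g ∈ PySem.Set.ofList (ngrams_alt m n) then acc + 1 else acc)
      = (fun (acc : Int) m => if g ∈ ngrams_alt m n then acc + 1 else acc) := by
    funext acc m
    by_cases h : g ∈ ngrams_alt m n
    · rw [if_pos ((hiff m).2 h), if_pos h]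
    · rw [if_neg (fun hc => h ((hiff m).1 hc)), if_neg h]
  rw [this, pv_fold_count (fun m => g ∈ ngrams_alt m n)]
  simp

-- A's value under a key equals B's count
lemma pv_getD_agree (ms : List String) (n : Int) (g : String) :
    PySem.Set.len ((pvD ms n).getD g PySem.Set.empty)
      = ((PySem.List.dedup ms).map (fun m => PySem.Set.ofList (ngrams_alt m n))).foldl
          (fun acc gs => if g ∈ gs then acc + 1 else acc) (0 : Int) := by
  rw [pvD_getD, pvB_count]
  have : PySem.Set.len (PySem.Set.ofList (ms.filter (fun m => decide (g ∈ ngrams_alt m n))))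
      = ((PySem.Set.ofList (ms.filter (fun m => decide (g ∈ ngrams_alt m n)))).length : Int) := rfl
  rw [this]
  congr 1
  have := pv_dedup_filter (fun m => decide (g ∈ ngrams_alt m n)) ms []
  rw [PySem.Set.ofList_eq_foldl]
  simp only [List.filter_nil] at this
  rw [this, PySem.List.dedup_eq_ofList, PySem.Set.ofList_eq_foldl]

-- master lemma: A's coverage dict equals B's gram-major coverage dict
lemma pv_cov_eq (ms : List String) (n : Int) :
    coverage_count ms n = coverage_alt ms n := by
  apply PySem.Dict.ext
  have hA : (coverage_count ms n).items
      = (pvD ms n).items.map (fun p => (p.1, PySem.Set.len p.2)) := by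
    unfold coverage_count
    rw [pvD_eq]
    have := PySem.Dict.items_foldl_insert_fresh (pvD ms n).items (fun p => p.1)
      (fun p => PySem.Set.len p.2) PySem.Dict.empty
      (by intro a _; rfl)
      (by exact pvD_keys_nodup ms n)
    simpa using this
  have hB : (coverage_alt ms n).items
      = (PySem.List.dedup ((PySem.List.dedup ms).flatMap (fun m => ngrams_alt m n))).map
          (fun g => (g, ((PySem.List.dedup ms).map (fun m => PySem.Set.ofList (ngrams_alt m n))).foldl
            (fun acc gs => if g ∈ gs then acc + 1 else acc) (0 : Int))) := by
    unfold coverage_alt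
    have := PySem.Dict.items_foldl_insert_fresh
      (PySem.List.dedup ((PySem.List.dedup ms).flatMap (fun m => ngrams_alt m n)))
      (fun g => g)
      (fun g => ((PySem.List.dedup ms).map (fun m => PySem.Set.ofList (ngrams_alt m n))).foldl
        (fun acc gs => if g ∈ gs then acc + 1 else acc) (0 : Int))
      PySem.Dict.empty
      (by intro a _; rfl)
      (by simp)
    simpa using this
  rw [hA, hB]
  rw [PySem.Dict.items_eq_map_keys (pvD ms n) (pvD_keys_nodup ms n) (PySem.Set.empty : PySem.Set String)]
  rw [List.map_map]
  rw [pv_keys_eq_gramUniverse]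
  apply List.map_congr_left
  intro g _
  simp only [Function.comp]
  rw [pv_getD_agree]

-- ===== VERDICT (by name: the statement is the Claim_ definition above) =====
theorem build_component_vocab_spec : Claim_equal_build_component_vocab := by
  intro all_middles min_coverage _
  unfold Spec_build_component_vocab
  unfold build_component_vocab build_component_vocab_alt
  rw [pv_cov_eq, pv_cov_eq]
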